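-- pv_equiv track=rewrite | github.com/RideGreg/LintCode | Python/1623-minimal-distance-in-the-array.py | minimalDistance
-- ===== SOURCE A (Python) =====
-- def minimalDistance(a, b):
--     def search(a, n): # search for 2 closest indices, then compare these 2 only
--         l, r = 0, len(a)-1
--         while l < r - 1:
--             m = l + (r-l)//2
--             if a[m] == n:
--                 return n
--             elif a[m] < n:
--                 l = m    # values before index m are much less, discard; but keep m
--             else:
--                 r = m    # values after index m are much larger, discard; but keep m
--         return a[l] if abs(a[l]-n) <= abs(a[r]-n) else a[r]
--
--         ''' # compare each m
--         delta, ans = float('inf'), float('inf')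
--         while l <= r:
--             m = l + (r-l)//2
--             if a[m] == n:
--                 return n
--             else:
--                 if abs(a[m]-n) < delta or (abs(a[m]-n)==delta and a[m]<ans):
--                     delta, ans = abs(a[m]-n), a[m]
--                 if a[m] < n:
--                     l = m + 1
--                 else:
--                     r = m - 1
--         '''
--         return ans
--
--     a.sort()
--     ans = []
--     for j in b:
--         ans.append(search(a, j))
--     return ans
-- ===== SOURCE B (Python) =====
-- def minimalDistance(a, b):
--     # same in-place sort of a as the original
--     a.sort()
--     def resolve(n):
--         best = a[0]
--         for x in a:
--             if abs(x - n) < abs(best - n) or (abs(x - n) == abs(best - n) and x < best):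
--                 best = x
--         return best
--     return [resolve(n) for n in b]
-- ===== Notes on version B (the rewrite author's own statement) =====
-- stated objective: simpler
-- what changed: Replaces the per-query binary search over the sorted array with a direct one-pass linear minimum scan keyed by (distance, value), scattering results via a comprehension.
import Mathlib
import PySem

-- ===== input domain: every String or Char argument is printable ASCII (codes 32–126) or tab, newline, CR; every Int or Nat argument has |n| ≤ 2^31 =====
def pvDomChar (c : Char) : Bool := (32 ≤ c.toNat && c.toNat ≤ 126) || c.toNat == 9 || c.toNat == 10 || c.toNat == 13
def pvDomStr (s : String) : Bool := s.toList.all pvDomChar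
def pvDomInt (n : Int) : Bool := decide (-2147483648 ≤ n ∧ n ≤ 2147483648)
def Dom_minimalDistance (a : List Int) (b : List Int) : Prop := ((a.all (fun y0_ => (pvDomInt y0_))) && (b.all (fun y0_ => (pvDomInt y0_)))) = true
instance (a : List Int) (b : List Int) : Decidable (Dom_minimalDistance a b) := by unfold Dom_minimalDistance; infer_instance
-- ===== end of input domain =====

-- B replaces A's per-query binary search with a one-pass linear minimum scan keyed by
-- (distance, value) over the sorted array (simpler; both sort `a` in place; return-value equivalence).


-- ===== PORT A =====
-- the inner `while l < r - 1` loop of `search`; a[m]/a[l]/a[r] via pyGet? (in range on every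
-- call inside Pre_; `.getD 0` only totalises the out-of-Pre_ IndexError case)
def goA (s : List Int) (n : Int) (l r : Int) : Int :=
  if _h : l < r - 1 then
    let m := l + PySem.Int.floordiv (r - l) 2
    let am := (PySem.List.pyGet? s m).getD 0
    if am = n then n
    else if am < n then goA s n m r
    else goA s n l m
  else
    let al := (PySem.List.pyGet? s l).getD 0
    let ar := (PySem.List.pyGet? s r).getD 0
    if |al - n| ≤ |ar - n| then al else ar
termination_by (r - l).toNat
decreasing_by
  · have h2 : 0 < (2:Int) := by omega
    have := PySem.Int.floordiv_eq_ediv_of_pos (a := r - l) h2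
    omega
  · have h2 : 0 < (2:Int) := by omega
    have := PySem.Int.floordiv_eq_ediv_of_pos (a := r - l) h2
    omega

def searchA (s : List Int) (n : Int) : Int :=
  goA s n 0 ((s.length : Int) - 1)

def minimalDistance (a : List Int) (b : List Int) : List Int :=
  let s := PySem.List.sorted a (fun x => x) false     -- a.sort()
  b.foldl (fun ans j => ans ++ [searchA s j]) []      -- ans.append(search(a, j))

-- ===== PORT B =====
def bestStep (n best x : Int) : Int :=
  if |x - n| < |best - n| ∨ (|x - n| = |best - n| ∧ x < best) then x else best

def resolveB (s : List Int) (n : Int) : Int :=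
  s.foldl (bestStep n) ((PySem.List.pyGet? s 0).getD 0)

def minimalDistance_alt (a : List Int) (b : List Int) : List Int :=
  let s := PySem.List.sorted a (fun x => x) false     -- a.sort()
  b.map (resolveB s)

-- ===== PRECONDITION & SPEC =====
-- Pre_ excludes only a = [] with b ≠ [], where both Pythons raise IndexError on the first query.
def Pre_minimalDistance (a : List Int) (b : List Int) : Prop := a ≠ [] ∨ b = []
instance (a : List Int) (b : List Int) : Decidable (Pre_minimalDistance a b) := by unfold Pre_minimalDistance; infer_instance
def pvWitness_minimalDistance : List Int × List Int := ([5, 2, 9], [3, 7, -1])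

def Spec_minimalDistance (a : List Int) (b : List Int) (out : List Int) : Prop := out = minimalDistance_alt a b
instance (a : List Int) (b : List Int) (out : List Int) : Decidable (Spec_minimalDistance a b out) := by unfold Spec_minimalDistance; infer_instance

-- ===== CLAIM (what is proved, stated in full; the proofs are below) =====
def Claim_equal_minimalDistance : Prop := ∀ (a : List Int) (b : List Int), Dom_minimalDistance a b → Pre_minimalDistance a b → Spec_minimalDistance a b (minimalDistance a b)

-- ===== LEMMAS AND PROOFS =====

-- "v is the element of s nearest to n, ties broken toward the smaller value"
def IsBest (n : Int) (s : List Int) (v : Int) : Prop :=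
  v ∈ s ∧ ∀ x ∈ s, |v - n| < |x - n| ∨ (|v - n| = |x - n| ∧ v ≤ x)

lemma isBest_unique {n : Int} {s : List Int} {v w : Int}
    (hv : IsBest n s v) (hw : IsBest n s w) : v = w := by
  rcases hv with ⟨hvm, hvb⟩
  rcases hw with ⟨hwm, hwb⟩
  rcases hvb w hwm with h1 | ⟨e1, l1⟩ <;> rcases hwb v hvm with h2 | ⟨e2, l2⟩ <;> omega

lemma bestStep_cases (n best x : Int) : bestStep n best x = x ∨ bestStep n best x = best := by
  unfold bestStep; split <;> simp

lemma bestStep_le_left (n best x : Int) :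
    |bestStep n best x - n| < |best - n| ∨ (|bestStep n best x - n| = |best - n| ∧ bestStep n best x ≤ best) := by
  unfold bestStep; split <;> omega

lemma bestStep_le_right (n best x : Int) :
    |bestStep n best x - n| < |x - n| ∨ (|bestStep n best x - n| = |x - n| ∧ bestStep n best x ≤ x) := by
  unfold bestStep; split <;> omega

lemma foldl_bestStep_spec (n : Int) :
    ∀ (s : List Int) (acc : Int),
      (s.foldl (bestStep n) acc = acc ∨ s.foldl (bestStep n) acc ∈ s) ∧
      (|s.foldl (bestStep n) acc - n| < |acc - n| ∨
        (|s.foldl (bestStep n) acc - n| = |acc - n| ∧ s.foldl (bestStep n) acc ≤ acc)) ∧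
      (∀ x ∈ s, |s.foldl (bestStep n) acc - n| < |x - n| ∨
        (|s.foldl (bestStep n) acc - n| = |x - n| ∧ s.foldl (bestStep n) acc ≤ x)) := by
  intro s
  induction s with
  | nil => intro acc; simp
  | cons x t ih =>
    intro acc
    simp only [List.foldl_cons]
    obtain ⟨hm, hacc, hall⟩ := ih (bestStep n acc x)
    refine ⟨?_, ?_, ?_⟩
    · rcases hm with h | h
      · rcases bestStep_cases n acc x with h2 | h2
        · right; rw [h, h2]; exact List.mem_cons_self
        · left; rw [h, h2]
      · right; exact List.mem_cons_of_mem _ h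
    · have := bestStep_le_left n acc x
      omega
    · intro y hy
      rcases List.mem_cons.mp hy with rfl | hy
      · have := bestStep_le_right n acc y
        omega
      · exact hall y hy

lemma resolveB_isBest (n : Int) (h : Int) (t : List Int) :
    IsBest n (h :: t) (resolveB (h :: t) n) := by
  unfold resolveB
  have h0 : (PySem.List.pyGet? (h :: t) 0).getD 0 = h := by
    rw [PySem.List.pyGet?_zero_cons]; rfl
  rw [h0]
  obtain ⟨hm, _, hall⟩ := foldl_bestStep_spec n (h :: t) h
  constructor
  · rcases hm with h1 | h1
    · rw [h1]; exact List.mem_cons_self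
    · exact h1
  · exact hall

-- sorted-list indexing is monotone
lemma sorted_get_mono {s : List Int} (hs : s.Pairwise (· ≤ ·)) {i j : Nat}
    (hij : i ≤ j) (hj : j < s.length) : s[i]'(by omega) ≤ s[j] := by
  rcases Nat.lt_or_ge i j with h | h
  · exact List.pairwise_iff_getElem.mp hs i j (by omega) hj h
  · have : i = j := by omega
    subst this; exact le_refl _

lemma goA_isBest (s : List Int) (hs : s.Pairwise (· ≤ ·)) (n : Int) :
    ∀ (k : Nat) (l r : Nat) (_hk : r - l ≤ k) (hlr : l ≤ r) (hr : r < s.length),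
      (l = 0 ∨ s[l]'(by omega) < n) → (r = s.length - 1 ∨ n < s[r]'hr) →
      (l < r ∨ (l = 0 ∧ r = 0 ∧ s.length = 1)) →
      IsBest n s (goA s n (l : Int) (r : Int)) := by
  intro k
  induction k with
  | zero =>
    intro l r hk hlr hr hInvL hInvR hshape
    have hleq : l = r := by omega
    rcases hshape with h | ⟨h0, hr0, hlen1⟩
    · omega
    subst h0; subst hr0
    rw [goA, dif_neg (by omega)]
    have hget : (PySem.List.pyGet? s ((0:Nat):Int)).getD 0 = s[0]'(by omega) := by
      rw [PySem.List.pyGet?_natCast, List.getElem?_eq_getElem (by omega)]; rfl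
    rw [if_pos (le_refl _), hget]
    constructor
    · exact List.getElem_mem _
    · intro x hx
      obtain ⟨i, hi, rfl⟩ := List.mem_iff_getElem.mp hx
      have : i = 0 := by omega
      subst this
      right; exact ⟨rfl, le_refl _⟩
  | succ k ih =>
    intro l r hk hlr hr hInvL hInvR hshape
    have hgetAt : ∀ (i : Nat) (hi : i < s.length), (PySem.List.pyGet? s ((i:Nat) : Int)).getD 0 = s[i]'hi := by
      intro i hi
      rw [PySem.List.pyGet?_natCast, List.getElem?_eq_getElem hi]; rfl
    by_cases hcond : ((l:Int) < (r:Int) - 1)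
    · rw [goA, dif_pos hcond]
      have hfd : PySem.Int.floordiv ((r:Int) - (l:Int)) 2 = ((r:Int) - (l:Int)) / 2 :=
        PySem.Int.floordiv_eq_ediv_of_pos (by omega)
      set mI : Int := (l:Int) + PySem.Int.floordiv ((r:Int) - (l:Int)) 2 with hmI
      have hml : (l:Int) < mI := by rw [hmI, hfd]; omega
      have hmr : mI < (r:Int) := by rw [hmI, hfd]; omega
      set m : Nat := mI.toNat with hm
      have hmI_eq : mI = (m : Int) := by rw [hm]; omega
      have hmlt : m < s.length := by omega
      have hgetm : (PySem.List.pyGet? s mI).getD 0 = s[m] := by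
        rw [hmI_eq]; exact hgetAt m hmlt
      show IsBest n s
        (if (PySem.List.pyGet? s mI).getD 0 = n then n
         else if (PySem.List.pyGet? s mI).getD 0 < n then goA s n mI (r:Int)
         else goA s n (l:Int) mI)
      rw [hgetm]
      by_cases heq : s[m] = n
      · rw [if_pos heq]
        constructor
        · rw [← heq]; exact List.getElem_mem _
        · intro x hx
          rcases eq_or_ne x n with rfl | hxe
          · right; simp
          · left
            have h2 : 0 < |x - n| := abs_pos.mpr (by omega)
            have h1 : |n - n| = 0 := by simp
            omega
      · rw [if_neg heq]
        by_cases hlt : s[m] < n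
        · rw [if_pos hlt, hmI_eq]
          exact ih m r (by omega) (by omega) hr (Or.inr hlt) hInvR (Or.inl (by omega))
        · rw [if_neg hlt, hmI_eq]
          have hgt : n < s[m] := by omega
          exact ih l m (by omega) (by omega) (by omega) hInvL (Or.inr hgt) (Or.inl (by omega))
    · rw [goA, dif_neg hcond]
      have hrl : r = l ∨ r = l + 1 := by omega
      have hl : l < s.length := by omega
      rw [hgetAt l hl, hgetAt r hr]
      set v : Int := if |s[l]'hl - n| ≤ |s[r]'hr - n| then s[l]'hl else s[r]'hr with hv
      have hvmem : v ∈ s := by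
        rw [hv]; split <;> exact List.getElem_mem _
      refine ⟨hvmem, ?_⟩
      have hslr : s[l]'hl ≤ s[r]'hr := sorted_get_mono hs hlr hr
      have hvl : |v - n| < |s[l]'hl - n| ∨ (|v - n| = |s[l]'hl - n| ∧ v ≤ s[l]'hl) := by
        rw [hv]; split <;> omega
      have hvr : |v - n| < |s[r]'hr - n| ∨ (|v - n| = |s[r]'hr - n| ∧ v ≤ s[r]'hr) := by
        rw [hv]; split <;> omega
      intro x hx
      obtain ⟨i, hi, rfl⟩ := List.mem_iff_getElem.mp hx
      have hcase : i ≤ l ∨ r ≤ i := by omega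
      rcases hcase with hil | hir
      · have hle : s[i] ≤ s[l]'hl := sorted_get_mono hs hil hl
        rcases Nat.lt_or_ge i l with hilt | hige
        · have hln : s[l]'hl < n := by
            rcases hInvL with h0 | h0
            · omega
            · exact h0
          have e1 : |s[l]'hl - n| = n - s[l]'hl := by
            rw [abs_of_neg (by omega : s[l]'hl - n < 0)]; ring
          have e2 : |s[i] - n| = n - s[i] := by
            rw [abs_of_neg (by omega : s[i] - n < 0)]; ring
          omega
        · have : i = l := by omega
          subst this; omega
      · have hle : s[r]'hr ≤ s[i] := sorted_get_mono hs hir hi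
        rcases Nat.lt_or_ge r i with hilt | hige
        · have hrn : n < s[r]'hr := by
            rcases hInvR with h0 | h0
            · omega
            · exact h0
          have e1 : |s[r]'hr - n| = s[r]'hr - n := by
            rw [abs_of_nonneg (by omega : (0:Int) ≤ s[r]'hr - n)]
          have e2 : |s[i] - n| = s[i] - n := by
            rw [abs_of_nonneg (by omega : (0:Int) ≤ s[i] - n)]
          omega
        · have : i = r := by omega
          subst this; omega

lemma searchA_eq_resolveB (s : List Int) (hs : s.Pairwise (· ≤ ·)) (hne : s ≠ []) (n : Int) :
    searchA s n = resolveB s n := by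
  obtain ⟨h, t, rfl⟩ := List.exists_cons_of_ne_nil hne
  have hA : IsBest n (h :: t) (searchA (h :: t) n) := by
    unfold searchA
    have hlen : ((h :: t).length : Int) - 1 = (((h :: t).length - 1 : Nat) : Int) := by
      simp [List.length_cons]
    rw [hlen]
    refine goA_isBest (h :: t) hs n ((h :: t).length) 0 ((h :: t).length - 1)
      ?_ ?_ ?_ (Or.inl rfl) (Or.inl rfl) ?_
    · omega
    · omega
    · simp
    · omega
  exact isBest_unique hA (resolveB_isBest n h t)

-- ===== VERDICT (by name: the statement is the Claim_ definition above) =====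
theorem minimalDistance_spec : Claim_equal_minimalDistance := by
  intro a b _hdom hpre
  unfold Spec_minimalDistance minimalDistance minimalDistance_alt
  rw [PySem.List.foldl_append_singleton_eq_map]
  rcases hpre with hne | rfl
  · apply List.map_congr_left
    intro j _
    apply searchA_eq_resolveB
    · exact PySem.List.sorted_pairwise a (fun x => x) 
    · intro h
      apply hne
      have hp := PySem.List.sorted_perm a (fun x => x) false
      rw [h] at hp
      exact hp.nil_eq.symm
  · simp
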